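-- pv_equiv track=rewrite | github.com/sleepyMS/programmers_solution | 여행경로.py | dfs
-- ===== SOURCE A (Python) =====
-- def dfs(graph, start):
--     stack = [start]
--     answer = []
--
--     while stack:
--         top = stack[-1]
--
--         if top in graph and graph[top]:
--             stack.append(graph[top].pop())
--         else:
--             answer.append(stack.pop())
--
--     return answer
-- ===== SOURCE B (Python) =====
-- def dfs(graph, start):
--     answer = []
--
--     def visit(node):
--         while node in graph and graph[node]:
--             visit(graph[node].pop())
--         answer.append(node)
--
--     visit(start)
--     return answer
-- ===== Notes on version B (the rewrite author's own statement) =====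
-- stated objective: alternative
-- what changed: The explicit worklist stack with push/pop bookkeeping is replaced by a recursive Hierholzer visit helper that exhausts a node's remaining edges and appends the node in post-order, using the call stack instead of the explicit stack.
import Mathlib
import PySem

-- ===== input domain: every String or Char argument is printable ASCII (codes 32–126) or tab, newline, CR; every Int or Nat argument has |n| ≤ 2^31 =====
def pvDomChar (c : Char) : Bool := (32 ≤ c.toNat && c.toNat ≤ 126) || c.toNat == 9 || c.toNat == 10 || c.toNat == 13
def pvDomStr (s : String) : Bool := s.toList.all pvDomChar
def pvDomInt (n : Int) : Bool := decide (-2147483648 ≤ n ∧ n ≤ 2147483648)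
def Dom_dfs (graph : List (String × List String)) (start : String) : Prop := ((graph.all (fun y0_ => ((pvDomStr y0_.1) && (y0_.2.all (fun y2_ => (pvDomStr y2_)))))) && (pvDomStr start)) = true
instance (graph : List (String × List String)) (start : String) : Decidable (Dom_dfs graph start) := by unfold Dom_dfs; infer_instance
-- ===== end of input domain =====

-- B replaces A's explicit worklist stack by a recursive Hierholzer visit helper (the call
-- stack carries the pending nodes); equal return values are proved — both programs also
-- mutate `graph` in place in Python (B performs the same pops), the theorems are about the
-- returned list.

-- total number of edges still in the dict; used only as FUEL (a totality guard: the loops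
-- terminate because every step pops an edge or the stack, so this fuel is never exhausted)
def pvEdges (g : PySem.Dict String (List String)) : Nat :=
  (g.items.map (fun p => p.2.length)).sum

-- ===== PORT A =====
-- while stack: top = stack[-1]; if top in graph and graph[top]: stack.append(graph[top].pop())
--              else: answer.append(stack.pop())
def pvLoopA : Nat → PySem.Dict String (List String) → List String → List String → List String
  | 0, _, _, ans => ans              -- fuel guard, never reached (see pvEdges comment)
  | f + 1, g, stack, ans =>
    match stack with
    | [] => ans
    | top :: rest =>
      match g.get? top with          -- 'top in graph and graph[top]'
      | some l =>
        match l.getLast? with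
        | some v => pvLoopA f (g.insert top l.dropLast) (v :: top :: rest) ans  -- graph[top].pop(); stack.append
        | none   => pvLoopA f g rest (ans ++ [top])                              -- answer.append(stack.pop())
      | none => pvLoopA f g rest (ans ++ [top])
  -- the stack grows at its Python END; it is modelled head-first (head = stack[-1])

def dfs (graph : List (String × List String)) (start : String) : List String :=
  let g := PySem.Dict.ofList graph
  pvLoopA (2 * pvEdges g + 2) g [start] []

-- ===== PORT B =====
-- def visit(node): while node in graph and graph[node]: visit(graph[node].pop())
--                  answer.append(node)
-- pvVisit = visit (returns the dict state and the answer segment it appends);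
-- pvWhile = visit's while loop
mutual
def pvVisit : Nat → PySem.Dict String (List String) → String → PySem.Dict String (List String) × List String
  | 0, g, _ => (g, [])               -- fuel guard, never reached
  | f + 1, g, node =>
    let r := pvWhile f g node
    (r.1, r.2 ++ [node])             -- answer.append(node)

def pvWhile : Nat → PySem.Dict String (List String) → String → PySem.Dict String (List String) × List String
  | 0, g, _ => (g, [])               -- fuel guard, never reached
  | f + 1, g, node =>
    match g.get? node with           -- 'node in graph and graph[node]'
    | some l =>
      match l.getLast? with
      | some v =>
        let r1 := pvVisit f (g.insert node l.dropLast) v   -- visit(graph[node].pop())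
        let r2 := pvWhile f r1.1 node                       -- loop again
        (r2.1, r1.2 ++ r2.2)
      | none => (g, [])
    | none => (g, [])
end

def dfs_alt (graph : List (String × List String)) (start : String) : List String :=
  let g := PySem.Dict.ofList graph
  (pvVisit (2 * pvEdges g + 2) g start).2   -- visit(start); return answer

-- ===== PRECONDITION & SPEC =====
def Spec_dfs (graph : List (String × List String)) (start : String) (out : List String) : Prop := out = dfs_alt graph start
instance (graph : List (String × List String)) (start : String) (out : List String) : Decidable (Spec_dfs graph start out) := by unfold Spec_dfs; infer_instance

-- ===== CLAIM (what is proved, stated in full; the proofs are below) =====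
def Claim_equal_dfs : Prop := ∀ (graph : List (String × List String)) (start : String), Dom_dfs graph start → Spec_dfs graph start (dfs graph start)

-- ===== LEMMAS AND PROOFS =====

-- replacing the (unique) entry of key k, whose value is the nonempty l, by l.dropLast
-- strictly lowers the edge sum
lemma pv_sum_replace_lt : ∀ (items : List (String × List String)) (k : String) (l : List String),
    (items.map Prod.fst).Nodup →
    items.find? (fun p => p.1 == k) = some (k, l) →
    l ≠ [] →
    ((items.map (fun p => if p.1 == k then (k, l.dropLast) else p)).map (fun p => p.2.length)).sum
      < (items.map (fun p => p.2.length)).sum := by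
  intro items k l
  induction items with
  | nil => intro _ h; simp at h
  | cons p t ih =>
    intro hnd hf hne
    rw [List.map_cons] at hnd
    by_cases hk : p.1 = k
    · rw [List.find?_cons_of_pos (by simp [hk])] at hf
      have hp : p = (k, l) := by injection hf
      subst hp
      have hk0 : k ∉ t.map Prod.fst := by
        have := (List.nodup_cons.mp hnd).1
        simpa [hk] using this
      have hnot : ∀ q ∈ t, ¬ q.1 = k := by
        intro q hq hqk
        exact hk0 (hqk ▸ List.mem_map_of_mem hq)
      have ht : t.map (fun p => if p.1 == k then (k, l.dropLast) else p) = t := by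
        conv_rhs => rw [← List.map_id t]
        apply List.map_congr_left
        intro a ha
        simp [hnot a ha]
      have hl : 0 < l.length := List.length_pos_iff.mpr hne
      rw [List.map_cons, ht, List.map_cons, List.map_cons, List.sum_cons, List.sum_cons,
        if_pos (by simp : (((k, l) : String × List String).1 == k) = true)]
      simp only [List.length_dropLast]
      omega
    · rw [List.find?_cons_of_neg (by simp [hk])] at hf
      have hnd' : (t.map Prod.fst).Nodup := (List.nodup_cons.mp hnd).2
      have := ih hnd' hf hne
      rw [List.map_cons, List.map_cons, List.sum_cons, if_neg (by simp [hk] : ¬((p.1 == k) = true)),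
        List.map_cons, List.sum_cons]
      omega

lemma pvEdges_insert_lt (g : PySem.Dict String (List String)) (k : String) (l : List String)
    (hnd : g.keys.Nodup) (hg : g.get? k = some l) (hne : l ≠ []) :
    pvEdges (g.insert k l.dropLast) < pvEdges g := by
  obtain ⟨items⟩ := g
  simp only [PySem.Dict.get?] at hg
  cases hfind : items.find? (fun p => p.1 == k) with
  | none => rw [hfind] at hg; simp at hg
  | some q =>
    rw [hfind] at hg
    simp at hg
    have hq1 := List.find?_some hfind
    have hq : q = (k, l) := by
      cases q with
      | mk a b => simp at hq1 hg; exact Prod.ext hq1 hg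
    subst hq
    have hcontains : (PySem.Dict.mk items).contains k = true := by
      simp only [PySem.Dict.contains, List.any_eq_true]
      exact ⟨(k, l), List.mem_of_find?_eq_some hfind, by simp⟩
    have hndm : (items.map Prod.fst).Nodup := by
      simpa [PySem.Dict.keys] using hnd
    simp only [PySem.Dict.insert, hcontains, if_pos, pvEdges]
    exact pv_sum_replace_lt items k l hndm hfind hne

-- pvVisit/pvWhile never add edges and keep keys nodup
lemma pvMono : ∀ (f : Nat) (g : PySem.Dict String (List String)) (x : String), g.keys.Nodup →
    ((pvVisit f g x).1.keys.Nodup ∧ pvEdges (pvVisit f g x).1 ≤ pvEdges g) ∧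
    ((pvWhile f g x).1.keys.Nodup ∧ pvEdges (pvWhile f g x).1 ≤ pvEdges g) := by
  intro f
  induction f with
  | zero => intro g x hnd; exact ⟨⟨hnd, le_rfl⟩, ⟨hnd, le_rfl⟩⟩
  | succ f ih =>
    intro g x hnd
    constructor
    · simpa only [pvVisit] using (ih g x hnd).2
    · cases hg : g.get? x with
      | none => simp only [pvWhile, hg]; exact ⟨hnd, le_rfl⟩
      | some l =>
        cases hl : l.getLast? with
        | none => simp only [pvWhile, hg, hl]; exact ⟨hnd, le_rfl⟩
        | some v =>
          have hne : l ≠ [] := by intro h; subst h; simp at hl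
          have hlt := pvEdges_insert_lt g x l hnd hg hne
          have hnd1 : (g.insert x l.dropLast).keys.Nodup :=
            PySem.Dict.nodup_keys_insert g x l.dropLast hnd
          have h1 := (ih (g.insert x l.dropLast) v hnd1).1
          have h2 := (ih (pvVisit f (g.insert x l.dropLast) v).1 x h1.1).2
          simp only [pvWhile, hg, hl]
          exact ⟨h2.1, by omega⟩

lemma pvLoopA_nil : ∀ (f : Nat) (g : PySem.Dict String (List String)) (ans : List String),
    pvLoopA f g [] ans = ans := by
  intro f g ans; cases f <;> rfl

-- pvLoopA is fuel-insensitive above the measure 2·edges + stack length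
lemma pvLoopA_congr : ∀ (n : Nat) (g : PySem.Dict String (List String)) (stack ans : List String) (f f' : Nat),
    g.keys.Nodup →
    2 * pvEdges g + stack.length ≤ n →
    2 * pvEdges g + stack.length ≤ f →
    2 * pvEdges g + stack.length ≤ f' →
    pvLoopA f g stack ans = pvLoopA f' g stack ans := by
  intro n
  induction n with
  | zero =>
    intro g stack ans f f' hnd hn _ _
    cases stack with
    | nil => rw [pvLoopA_nil, pvLoopA_nil]
    | cons top rest => simp at hn
  | succ n ih =>
    intro g stack ans f f' hnd hn hf hf'
    cases stack with
    | nil => rw [pvLoopA_nil, pvLoopA_nil]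
    | cons top rest =>
      simp only [List.length_cons] at hn hf hf'
      cases f with
      | zero => omega
      | succ fa =>
        cases f' with
        | zero => omega
        | succ fa' =>
          cases hg : g.get? top with
          | none =>
            simp only [pvLoopA, hg]
            exact ih g rest (ans ++ [top]) fa fa' hnd (by omega) (by omega) (by omega)
          | some l =>
            cases hl : l.getLast? with
            | none =>
              simp only [pvLoopA, hg, hl]
              exact ih g rest (ans ++ [top]) fa fa' hnd (by omega) (by omega) (by omega)
            | some v =>
              have hne : l ≠ [] := by intro h; subst h; simp at hl
              have hlt := pvEdges_insert_lt g top l hnd hg hne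
              have hnd1 : (g.insert top l.dropLast).keys.Nodup :=
                PySem.Dict.nodup_keys_insert g top l.dropLast hnd
              simp only [pvLoopA, hg, hl]
              exact ih (g.insert top l.dropLast) (v :: top :: rest) ans fa fa' hnd1
                (by simp; omega) (by simp; omega) (by simp; omega)

-- pvVisit/pvWhile are fuel-insensitive above 2·edges + 2 (resp. + 1)
lemma pvB_congr : ∀ (n : Nat) (g : PySem.Dict String (List String)) (x : String) (f f' : Nat),
    g.keys.Nodup →
    ((2 * pvEdges g + 1 ≤ n → 2 * pvEdges g + 1 ≤ f → 2 * pvEdges g + 1 ≤ f' →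
        pvWhile f g x = pvWhile f' g x) ∧
     (2 * pvEdges g + 2 ≤ n → 2 * pvEdges g + 2 ≤ f → 2 * pvEdges g + 2 ≤ f' →
        pvVisit f g x = pvVisit f' g x)) := by
  intro n
  induction n with
  | zero =>
    intro g x f f' _
    exact ⟨by intro h; omega, by intro h; omega⟩
  | succ n ih =>
    intro g x f f' hnd
    constructor
    · intro hn hf hf'
      cases f with
      | zero => omega
      | succ fa =>
        cases f' with
        | zero => omega
        | succ fa' =>
          cases hg : g.get? x with
          | none => simp only [pvWhile, hg]
          | some l =>
            cases hl : l.getLast? with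
            | none => simp only [pvWhile, hg, hl]
            | some v =>
              have hne : l ≠ [] := by intro h; subst h; simp at hl
              have hlt := pvEdges_insert_lt g x l hnd hg hne
              have hnd1 : (g.insert x l.dropLast).keys.Nodup :=
                PySem.Dict.nodup_keys_insert g x l.dropLast hnd
              have hv := (ih (g.insert x l.dropLast) v fa fa' hnd1).2
                (by omega) (by omega) (by omega)
              have hm := pvMono fa' (g.insert x l.dropLast) v hnd1 |>.1
              have hw := (ih (pvVisit fa' (g.insert x l.dropLast) v).1 x fa fa' hm.1).1
                (by omega) (by omega) (by omega)
              simp only [pvWhile, hg, hl, hv, hw]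
    · intro hn hf hf'
      cases f with
      | zero => omega
      | succ fa =>
        cases f' with
        | zero => omega
        | succ fa' =>
          simp only [pvVisit]
          have hw := (ih g x fa fa' hnd).1 (by omega) (by omega) (by omega)
          rw [hw]

-- one-step unfolding equations, used to rewrite without unfolding recursively
lemma pvLoopA_step_edge (f : Nat) (g : PySem.Dict String (List String)) (top : String)
    (rest ans : List String) (l : List String) (v : String)
    (hg : g.get? top = some l) (hl : l.getLast? = some v) :
    pvLoopA (f + 1) g (top :: rest) ans = pvLoopA f (g.insert top l.dropLast) (v :: top :: rest) ans := by
  simp only [pvLoopA, hg, hl]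

lemma pvLoopA_step_pop_none (f : Nat) (g : PySem.Dict String (List String)) (top : String)
    (rest ans : List String) (hg : g.get? top = none) :
    pvLoopA (f + 1) g (top :: rest) ans = pvLoopA f g rest (ans ++ [top]) := by
  simp only [pvLoopA, hg]

lemma pvLoopA_step_pop_empty (f : Nat) (g : PySem.Dict String (List String)) (top : String)
    (rest ans : List String) (l : List String)
    (hg : g.get? top = some l) (hl : l.getLast? = none) :
    pvLoopA (f + 1) g (top :: rest) ans = pvLoopA f g rest (ans ++ [top]) := by
  simp only [pvLoopA, hg, hl]

lemma pvVisit_step (f : Nat) (g : PySem.Dict String (List String)) (x : String) :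
    pvVisit (f + 1) g x = ((pvWhile f g x).1, (pvWhile f g x).2 ++ [x]) := by
  simp only [pvVisit]

lemma pvWhile_step_edge (f : Nat) (g : PySem.Dict String (List String)) (x : String)
    (l : List String) (v : String) (hg : g.get? x = some l) (hl : l.getLast? = some v) :
    pvWhile (f + 1) g x =
      ((pvWhile f (pvVisit f (g.insert x l.dropLast) v).1 x).1,
        (pvVisit f (g.insert x l.dropLast) v).2 ++ (pvWhile f (pvVisit f (g.insert x l.dropLast) v).1 x).2) := by
  simp only [pvWhile, hg, hl]

lemma pvWhile_stop_none (f : Nat) (g : PySem.Dict String (List String)) (x : String)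
    (hg : g.get? x = none) : pvWhile (f + 1) g x = (g, []) := by
  simp only [pvWhile, hg]

lemma pvWhile_stop_empty (f : Nat) (g : PySem.Dict String (List String)) (x : String)
    (l : List String) (hg : g.get? x = some l) (hl : l.getLast? = none) :
    pvWhile (f + 1) g x = (g, []) := by
  simp only [pvWhile, hg, hl]

-- the bridge: one excursion of A's stack loop from x is exactly B's visit(x)
lemma pvBridge : ∀ (n : Nat) (g : PySem.Dict String (List String)) (x : String) (rest ans : List String) (f fw : Nat),
    g.keys.Nodup → pvEdges g ≤ n →
    2 * pvEdges g + rest.length + 2 ≤ f →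
    2 * pvEdges g + 2 ≤ fw →
    pvLoopA f g (x :: rest) ans = pvLoopA f (pvVisit fw g x).1 rest (ans ++ (pvVisit fw g x).2) := by
  intro n
  induction n using Nat.strong_induction_on with
  | _ n ih =>
    intro g x rest ans f fw hnd hen hf hfw
    cases f with
    | zero => omega
    | succ fa =>
      cases fw with
      | zero => omega
      | succ fb =>
        cases fb with
        | zero => omega
        | succ fc =>
          cases hg : g.get? x with
          | none =>
            rw [pvLoopA_step_pop_none fa g x rest ans hg, pvVisit_step (fc + 1) g x,
              pvWhile_stop_none fc g x hg]
            simp only [List.nil_append]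
            exact pvLoopA_congr (2 * pvEdges g + rest.length) g rest (ans ++ [x]) fa (fa + 1)
              hnd le_rfl (by omega) (by omega)
          | some l =>
            cases hl : l.getLast? with
            | none =>
              rw [pvLoopA_step_pop_empty fa g x rest ans l hg hl, pvVisit_step (fc + 1) g x,
                pvWhile_stop_empty fc g x l hg hl]
              simp only [List.nil_append]
              exact pvLoopA_congr (2 * pvEdges g + rest.length) g rest (ans ++ [x]) fa (fa + 1)
                hnd le_rfl (by omega) (by omega)
            | some v =>
              have hne : l ≠ [] := by intro h; subst h; simp at hl
              have hlt := pvEdges_insert_lt g x l hnd hg hne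
              have hnd1 : (g.insert x l.dropLast).keys.Nodup :=
                PySem.Dict.nodup_keys_insert g x l.dropLast hnd
              have hbump := pvLoopA_congr (2 * pvEdges (g.insert x l.dropLast) + rest.length + 2)
                (g.insert x l.dropLast) (v :: x :: rest) ans fa (fa + 1) hnd1
                (by simp; omega) (by simp; omega) (by simp; omega)
              have h1 := ih (pvEdges (g.insert x l.dropLast)) (by omega)
                (g.insert x l.dropLast) v (x :: rest) ans (fa + 1) (fc + 1) hnd1 le_rfl
                (by simp; omega) (by omega)
              have hm := pvMono (fc + 1) (g.insert x l.dropLast) v hnd1 |>.1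
              have h2 := ih (pvEdges (pvVisit (fc + 1) (g.insert x l.dropLast) v).1)
                (by omega)
                (pvVisit (fc + 1) (g.insert x l.dropLast) v).1 x rest
                (ans ++ (pvVisit (fc + 1) (g.insert x l.dropLast) v).2) (fa + 1) (fc + 1)
                hm.1 le_rfl (by simp; omega) (by omega)
              have hc := (pvB_congr (2 * pvEdges (g.insert x l.dropLast) + 2)
                (g.insert x l.dropLast) v fc (fc + 1) hnd1).2 le_rfl (by omega) (by omega)
              rw [pvLoopA_step_edge fa g x rest ans l v hg hl, hbump, h1, h2,
                pvVisit_step (fc + 1) g x, pvWhile_step_edge fc g x l v hg hl, hc,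
                pvVisit_step fc (pvVisit (fc + 1) (g.insert x l.dropLast) v).1 x]
              simp [List.append_assoc]

-- ===== VERDICT (by name: the statement is the Claim_ definition above) =====
theorem dfs_spec : Claim_equal_dfs := by
  intro graph start _
  unfold Spec_dfs dfs dfs_alt
  have hnd : (PySem.Dict.ofList graph).keys.Nodup := PySem.Dict.nodup_keys_ofList graph
  have hb := pvBridge (pvEdges (PySem.Dict.ofList graph)) (PySem.Dict.ofList graph) start [] []
      (2 * pvEdges (PySem.Dict.ofList graph) + 2) (2 * pvEdges (PySem.Dict.ofList graph) + 2)
      hnd le_rfl (by simp) le_rfl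
  simp only [List.nil_append] at hb
  rw [hb, pvLoopA_nil]
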